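-- pv_equiv track=rewrite | github.com/buildrr89/rade-engine | src/demo/run_raid_visualizer.py | _app_name_from_host
-- ===== SOURCE A (Python) =====
-- def _app_name_from_host(host: str) -> str:
--     known_names = {
--         "airbnb.com": "Airbnb",
--         "amazon.com": "Amazon",
--         "amazon.com.au": "Amazon",
--         "linear.app": "Linear",
--         "open.spotify.com": "Spotify",
--         "spotify.com": "Spotify",
--         "wikipedia.org": "Wikipedia",
--     }
--     for suffix, app_name in known_names.items():
--         if host == suffix or host.endswith(f".{suffix}"):
--             return app_name
--     if not host:
--         return "Chrome"
--     primary = host.split(".")[0]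
--     return primary.replace("-", " ").title()
-- ===== SOURCE B (Python) =====
-- def _app_name_from_host(host: str) -> str:
--     if not host:
--         return "Chrome"
--     known_names = {
--         "airbnb.com": "Airbnb",
--         "amazon.com": "Amazon",
--         "amazon.com.au": "Amazon",
--         "linear.app": "Linear",
--         "open.spotify.com": "Spotify",
--         "spotify.com": "Spotify",
--         "wikipedia.org": "Wikipedia",
--     }
--     # walk the host's own dotted suffixes and look each up directly
--     suffix = host
--     while True:
--         name = known_names.get(suffix)
--         if name is not None:
--             return name
--         _, sep, rest = suffix.partition(".")
--         if not sep:
--             break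
--         suffix = rest
--     primary = host.split(".")[0]
--     return primary.replace("-", " ").title()
-- ===== Notes on version B (the rewrite author's own statement) =====
-- stated objective: idiomatic
-- what changed: Instead of scanning all 7 known suffixes with ==/endswith, B guards the empty host, then walks the host's own dotted suffixes (partition on the first '.') and looks each up directly in the dict.
import Mathlib
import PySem

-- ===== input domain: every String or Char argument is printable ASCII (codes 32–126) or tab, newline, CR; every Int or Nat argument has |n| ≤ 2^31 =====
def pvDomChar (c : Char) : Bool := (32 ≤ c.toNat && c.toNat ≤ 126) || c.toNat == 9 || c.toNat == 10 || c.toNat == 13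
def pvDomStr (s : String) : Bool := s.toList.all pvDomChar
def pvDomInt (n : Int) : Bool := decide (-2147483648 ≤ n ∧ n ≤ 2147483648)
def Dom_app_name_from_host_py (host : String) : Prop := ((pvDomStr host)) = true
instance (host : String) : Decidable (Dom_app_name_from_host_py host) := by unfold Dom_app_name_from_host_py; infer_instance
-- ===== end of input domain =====

-- B replaces A's scan over all 7 known suffixes with direct dict lookups of the host's own dotted suffixes (same return value everywhere).


-- shared data: the dict literal 'known_names' (identical in both Pythons)
def pvKnownNames : PySem.Dict (List Char) (List Char) := PySem.Dict.mk [
  ("airbnb.com".toList, "Airbnb".toList),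
  ("amazon.com".toList, "Amazon".toList),
  ("amazon.com.au".toList, "Amazon".toList),
  ("linear.app".toList, "Linear".toList),
  ("open.spotify.com".toList, "Spotify".toList),
  ("spotify.com".toList, "Spotify".toList),
  ("wikipedia.org".toList, "Wikipedia".toList)]

-- hand port of str.title() (not in PySem), exact on the ASCII domain: a letter is
-- uppercased iff the previous character is not a letter, otherwise lowercased.
def pvTitle (prev : Bool) : List Char → List Char
  | [] => []
  | c :: cs =>
    (if PySem.Chars.isalpha c then (if prev then PySem.Chars.lowerChar c else PySem.Chars.upperChar c) else c)
      :: pvTitle (PySem.Chars.isalpha c) cs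

-- shared fallback (identical final two lines of both Pythons): host.split(".")[0].replace("-", " ").title()
def pvFallback (h : List Char) : List Char :=
  match PySem.List.pyGet? (PySem.Chars.splitOn h ['.']) 0 with
  | some primary => pvTitle false (PySem.Chars.replace primary ['-'] [' '])
  | none => []  -- unreachable: split always returns at least one piece

-- ===== PORT A =====
-- the 'for suffix, app_name in known_names.items()' loop with its early return
def aScan (h : List Char) : List (List Char × List Char) → Option (List Char)
  | [] => none
  | (suffix, appName) :: rest =>
    if h == suffix || PySem.Chars.endswith h ('.' :: suffix) then some appName
    else aScan h rest

def app_name_from_host_py (host : String) : String :=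
  match aScan host.toList pvKnownNames.items with
  | some appName => String.ofList appName
  | none =>
    if host.toList = [] then "Chrome"
    else String.ofList (pvFallback host.toList)

-- ===== PORT B =====
-- rest of suffix.partition("."): everything after the first '.'
def pvDropLabel (s : List Char) : List Char := (s.dropWhile (· != '.')).tail

theorem pvDropLabel_lt (s : List Char) (h : '.' ∈ s) : (pvDropLabel s).length < s.length := by
  have hne : s.dropWhile (· != '.') ≠ [] := by
    simp only [Ne, List.dropWhile_eq_nil_iff]
    push Not
    exact ⟨'.', h, by simp⟩
  have h1 : (pvDropLabel s).length < (s.dropWhile (· != '.')).length := by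
    unfold pvDropLabel
    cases hdw : s.dropWhile (· != '.') with
    | nil => exact absurd hdw hne
    | cons a t => simp
  exact lt_of_lt_of_le h1 (List.length_dropWhile_le _ _)

-- the 'while True' walk over the host's own dotted suffixes
def bWalk (s : List Char) : Option (List Char) :=
  match PySem.Dict.get? pvKnownNames s with
  | some name => some name
  | none =>
    if hd : '.' ∈ s then bWalk (pvDropLabel s)   -- sep nonempty: continue with the rest
    else none                                     -- no '.' left: break
termination_by s.length
decreasing_by exact pvDropLabel_lt s hd

def app_name_from_host_py_alt (host : String) : String :=
  if host.toList = [] then "Chrome"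
  else
    match bWalk host.toList with
    | some name => String.ofList name
    | none => String.ofList (pvFallback host.toList)

-- ===== PRECONDITION & SPEC =====
def Spec_app_name_from_host_py (host : String) (out : String) : Prop := out = app_name_from_host_py_alt host
instance (host : String) (out : String) : Decidable (Spec_app_name_from_host_py host out) := by unfold Spec_app_name_from_host_py; infer_instance

-- ===== CLAIM (what is proved, stated in full; the proofs are below) =====
def Claim_equal_app_name_from_host_py : Prop := ∀ (host : String), Dom_app_name_from_host_py host → Spec_app_name_from_host_py host (app_name_from_host_py host)

-- ===== LEMMAS AND PROOFS =====

-- the boolean test of A's loop, as a suffix statement ('.'-extended so that 'h == k' folds in)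
theorem match_iff (h k : List Char) :
    (h == k || PySem.Chars.endswith h ('.' :: k)) = true ↔ ('.' :: k) <:+ ('.' :: h) := by
  rw [Bool.or_eq_true, beq_iff_eq, PySem.Chars.endswith_iff, List.suffix_cons_iff]
  constructor
  · rintro (rfl | hs)
    · exact Or.inl rfl
    · exact Or.inr hs
  · rintro (heq | hs)
    · injection heq with _ h2
      exact Or.inl h2.symm
    · exact Or.inr hs

theorem aScan_none_iff (h : List Char) (ps : List (List Char × List Char)) :
    aScan h ps = none ↔ ∀ p ∈ ps, ¬ ('.' :: p.1) <:+ ('.' :: h) := by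
  induction ps with
  | nil => simp [aScan]
  | cons p rest ih =>
    obtain ⟨k, v⟩ := p
    by_cases hb : (h == k || PySem.Chars.endswith h ('.' :: k)) = true
    · simp [aScan, hb, (match_iff h k).mp hb]
    · simp [aScan, hb, ih]
      intro _
      exact fun hc => hb ((match_iff h k).mpr hc)

theorem aScan_some (h v : List Char) (ps : List (List Char × List Char))
    (hs : aScan h ps = some v) : ∃ k, (k, v) ∈ ps ∧ ('.' :: k) <:+ ('.' :: h) := by
  induction ps with
  | nil => simp [aScan] at hs
  | cons p rest ih =>
    obtain ⟨k, w⟩ := p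
    by_cases hb : (h == k || PySem.Chars.endswith h ('.' :: k)) = true
    · simp [aScan, hb] at hs
      exact ⟨k, by simp [hs], (match_iff h k).mp hb⟩
    · simp [aScan, hb] at hs
      obtain ⟨k', hk', hsuf⟩ := ih hs
      exact ⟨k', List.mem_cons_of_mem _ hk', hsuf⟩

-- a dotted suffix of t ++ '.'::r with t dot-free is a dotted suffix of '.'::r
theorem dotted_suffix_drop (t k r : List Char) (ht : ∀ c ∈ t, c ≠ '.')
    (hs : ('.' :: k) <:+ (t ++ '.' :: r)) : ('.' :: k) <:+ ('.' :: r) := by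
  induction t with
  | nil => simpa using hs
  | cons c t' ih =>
    rw [List.cons_append, List.suffix_cons_iff] at hs
    rcases hs with heq | hs
    · have hc : '.' = c := by injection heq
      exact absurd hc.symm (ht c List.mem_cons_self)
    · exact ih (fun d hd => ht d (List.mem_cons_of_mem _ hd)) hs

-- decomposition of s at its first '.'
theorem split_at_dot (s : List Char) (hd : '.' ∈ s) :
    s = s.takeWhile (· != '.') ++ '.' :: pvDropLabel s ∧ ∀ c ∈ s.takeWhile (· != '.'), c ≠ '.' := by
  constructor
  · have hne : s.dropWhile (· != '.') ≠ [] := by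
      simp only [Ne, List.dropWhile_eq_nil_iff]
      push Not
      exact ⟨'.', hd, by simp⟩
    have hhead : (s.dropWhile (· != '.')).head hne = '.' := by
      have := List.head_dropWhile_not (p := (· != '.')) (l := s) hne
      simpa using this
    have : s.dropWhile (· != '.') = '.' :: pvDropLabel s := by
      have hexp := (List.cons_head_tail hne).symm
      rw [hhead] at hexp
      exact hexp
    rw [← this]
    exact (List.takeWhile_append_dropWhile).symm
  · intro c hc
    have := List.mem_takeWhile_imp hc
    simpa using this

theorem bWalk_some (s v : List Char) (hs : bWalk s = some v) :
    ∃ k, (k, v) ∈ pvKnownNames.items ∧ ('.' :: k) <:+ ('.' :: s) := by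
  induction s using bWalk.induct with
  | case1 s name hget =>
    rw [bWalk, hget] at hs
    injection hs with hv
    subst hv
    exact ⟨s, PySem.Dict.mem_items_of_get?_eq_some _ hget, List.suffix_refl _⟩
  | case2 s hget hd ih =>
    rw [bWalk, hget] at hs
    simp only [dif_pos hd] at hs
    obtain ⟨k, hk, hsuf⟩ := ih hs
    refine ⟨k, hk, ?_⟩
    obtain ⟨hdec, -⟩ := split_at_dot s hd
    have hsub : ('.' :: pvDropLabel s) <:+ s := by
      conv_rhs => rw [hdec]
      exact List.suffix_append _ _
    rw [List.suffix_cons_iff] at hsuf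
    rcases hsuf with heq | hsuf
    · rw [heq]
      exact hsub.trans (List.suffix_cons _ _)
    · have h1 : pvDropLabel s <:+ s := (List.suffix_cons '.' _).trans hsub
      exact hsuf.trans (h1.trans (List.suffix_cons _ _))
  | case3 s hget hd =>
    rw [bWalk, hget] at hs
    simp [dif_neg hd] at hs

theorem bWalk_none (s : List Char) (hs : bWalk s = none) :
    ∀ k v, (k, v) ∈ pvKnownNames.items → ¬ ('.' :: k) <:+ ('.' :: s) := by
  induction s using bWalk.induct with
  | case1 s name hget =>
    rw [bWalk, hget] at hs
    exact absurd hs (by simp)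
  | case2 s hget hd ih =>
    rw [bWalk, hget, dif_pos hd] at hs
    intro k v hkv hsuf
    rw [List.suffix_cons_iff] at hsuf
    rcases hsuf with heq | hsuf
    · have hks : k = s := by injection heq
      subst hks
      have := (PySem.Dict.get?_eq_none_iff_not_mem_keys _ _).mp hget
      exact this (PySem.Dict.mem_keys_of_mem_items _ hkv)
    · obtain ⟨hdec, hnd⟩ := split_at_dot s hd
      rw [hdec] at hsuf
      exact ih hs k v hkv (dotted_suffix_drop _ _ _ hnd hsuf)
  | case3 s hget hd =>
    intro k v hkv hsuf
    rw [List.suffix_cons_iff] at hsuf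
    rcases hsuf with heq | hsuf
    · have hks : k = s := by injection heq
      subst hks
      have := (PySem.Dict.get?_eq_none_iff_not_mem_keys _ _).mp hget
      exact this (PySem.Dict.mem_keys_of_mem_items _ hkv)
    · exact hd (hsuf.subset (List.mem_cons_self))

-- any two simultaneously-matching table keys carry the same name (checked over the 49 pairs)
theorem pair_values : ∀ k1 v1 k2 v2, (k1, v1) ∈ pvKnownNames.items → (k2, v2) ∈ pvKnownNames.items →
    ('.' :: k1) <:+ ('.' :: k2) → v1 = v2 := by
  intro k1 v1 k2 v2 h1 h2 hsuf
  fin_cases h1 <;> fin_cases h2 <;> revert hsuf <;> decide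

theorem keys_nonempty : ∀ p ∈ pvKnownNames.items, p.1 ≠ ([] : List Char) := by
  intro p hp
  fin_cases hp <;> decide

-- ===== VERDICT (by name: the statement is the Claim_ definition above) =====
theorem app_name_from_host_py_spec : Claim_equal_app_name_from_host_py := by
  intro host _
  unfold Spec_app_name_from_host_py app_name_from_host_py app_name_from_host_py_alt
  cases ha : aScan host.toList pvKnownNames.items with
  | none =>
    have hnone : ∀ p ∈ pvKnownNames.items, ¬ ('.' :: p.1) <:+ ('.' :: host.toList) :=
      (aScan_none_iff host.toList _).mp ha
    have hb : bWalk host.toList = none := by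
      cases hbw : bWalk host.toList with
      | none => rfl
      | some v =>
        obtain ⟨k, hk, hsuf⟩ := bWalk_some host.toList v hbw
        exact absurd hsuf (hnone (k, v) hk)
    by_cases he : host.toList = [] <;> simp [he, hb]
  | some v =>
    obtain ⟨k, hk, hsuf⟩ := aScan_some host.toList v _ ha
    have hne : host.toList ≠ [] := by
      intro he
      rw [he] at hsuf
      have hlen := hsuf.length_le
      simp at hlen
      exact keys_nonempty (k, v) hk hlen
    cases hbw : bWalk host.toList with
    | none => exact absurd hsuf (bWalk_none host.toList hbw k v hk)
    | some v2 =>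
      obtain ⟨k2, hk2, hsuf2⟩ := bWalk_some host.toList v2 hbw
      have hveq : v = v2 := by
        rcases List.suffix_or_suffix_of_suffix hsuf hsuf2 with hc | hc
        · exact pair_values k v k2 v2 hk hk2 hc
        · exact (pair_values k2 v2 k v hk2 hk hc).symm
      simp [hne, hveq]
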